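-- pv_equiv track=rewrite | github.com/RoblabWh/ROSHAN | src/pysim/old/network.py | get_in_features_3d
-- ===== SOURCE A (Python) =====
-- def get_in_features_3d(h_in, w_in, d_in, layers_dict):
--     for layer in layers_dict:
--         padding = layer['padding']
--         dilation = layer['dilation']
--         kernel_size = layer['kernel_size']
--         stride = layer['stride']
--
--         d_in = ((d_in + 2 * padding[0] - dilation[0] * (kernel_size[0] - 1) - 1) // stride[0]) + 1
--         h_in = ((h_in + 2 * padding[1] - dilation[1] * (kernel_size[1] - 1) - 1) // stride[1]) + 1
--         w_in = ((w_in + 2 * padding[2] - dilation[2] * (kernel_size[2] - 1) - 1) // stride[2]) + 1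
--
--     return d_in * h_in * w_in
-- ===== SOURCE B (Python) =====
-- def get_in_features_3d(h_in, w_in, d_in, layers_dict):
--     # Fold each axis's whole chain of conv maps x -> (x + c)//s + 1 into ONE
--     # affine-floor map x -> (x + C)//S + t (valid because strides are positive,
--     # so floor divisions nest), then apply it once per axis.
--     def fold_axis(axis):
--         C, S, t = 0, 1, 0
--         for layer in layers_dict:
--             c = (2 * layer['padding'][axis]
--                  - layer['dilation'][axis] * (layer['kernel_size'][axis] - 1) - 1)
--             C += (t + c) * S
--             S *= layer['stride'][axis]
--             t = 1
--         return C, S, t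
--
--     def apply(x, m):
--         C, S, t = m
--         return (x + C) // S + t
--
--     return apply(d_in, fold_axis(0)) * apply(h_in, fold_axis(1)) * apply(w_in, fold_axis(2))
-- ===== Notes on version B (the rewrite author's own statement) =====
-- stated objective: alternative
-- what changed: Instead of iterating the conv formula over the layers per dimension, B algebraically composes each axis's whole chain of maps x -> (x+c)//s + 1 into a single affine-floor map x -> (x+C)//S + t (accumulating C, S, t in one pass, using that floor divisions by positive strides nest) and performs just one division per axis at the end.
import Mathlib
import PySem

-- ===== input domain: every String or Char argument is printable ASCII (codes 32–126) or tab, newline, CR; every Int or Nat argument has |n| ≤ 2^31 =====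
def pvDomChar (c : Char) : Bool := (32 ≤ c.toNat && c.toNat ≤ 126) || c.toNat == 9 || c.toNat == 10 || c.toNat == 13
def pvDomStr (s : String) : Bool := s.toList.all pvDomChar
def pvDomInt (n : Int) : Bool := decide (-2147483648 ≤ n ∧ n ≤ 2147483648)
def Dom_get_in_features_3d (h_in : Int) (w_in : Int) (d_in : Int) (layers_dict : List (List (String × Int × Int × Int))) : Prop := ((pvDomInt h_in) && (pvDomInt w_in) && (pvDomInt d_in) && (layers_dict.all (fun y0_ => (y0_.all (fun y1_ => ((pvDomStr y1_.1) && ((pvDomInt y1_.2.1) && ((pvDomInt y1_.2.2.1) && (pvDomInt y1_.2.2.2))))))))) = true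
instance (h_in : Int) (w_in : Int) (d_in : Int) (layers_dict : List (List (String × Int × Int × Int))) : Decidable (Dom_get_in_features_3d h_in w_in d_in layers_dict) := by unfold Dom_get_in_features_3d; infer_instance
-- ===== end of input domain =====

-- B replaces A's per-layer iteration by algebraically composing, per axis, the whole chain
-- of conv maps x ↦ (x+c)//s + 1 into ONE affine-floor map x ↦ (x+C)//S + t applied once
-- (objective: alternative algorithm; valid because strides are positive, Pre_ below).

-- ===== PORT A =====
-- one step of A's fused loop, updating (d, h, w) in the Python's order
def gifStepA (layer : List (String × Int × Int × Int)) (d h w : Int) : Int × Int × Int :=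
  let padding := (PySem.Dict.get? (PySem.Dict.mk layer) "padding").getD (0, 0, 0)
  let dilation := (PySem.Dict.get? (PySem.Dict.mk layer) "dilation").getD (0, 0, 0)
  let kernel_size := (PySem.Dict.get? (PySem.Dict.mk layer) "kernel_size").getD (0, 0, 0)
  let stride := (PySem.Dict.get? (PySem.Dict.mk layer) "stride").getD (0, 0, 0)
  (PySem.Int.floordiv (d + 2 * padding.1 - dilation.1 * (kernel_size.1 - 1) - 1) stride.1 + 1,
   PySem.Int.floordiv (h + 2 * padding.2.1 - dilation.2.1 * (kernel_size.2.1 - 1) - 1) stride.2.1 + 1,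
   PySem.Int.floordiv (w + 2 * padding.2.2 - dilation.2.2 * (kernel_size.2.2 - 1) - 1) stride.2.2 + 1)

def gifLoopA : List (List (String × Int × Int × Int)) → Int → Int → Int → Int × Int × Int
  | [], d, h, w => (d, h, w)
  | layer :: rest, d, h, w =>
      let s := gifStepA layer d h w
      gifLoopA rest s.1 s.2.1 s.2.2

def get_in_features_3d (h_in : Int) (w_in : Int) (d_in : Int) (layers_dict : List (List (String × Int × Int × Int))) : Int :=
  let r := gifLoopA layers_dict d_in h_in w_in
  r.1 * r.2.1 * r.2.2

-- ===== PORT B =====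
-- tuple indexing t[axis] used by B (axis is always 0, 1 or 2)
def gifSel (axis : Nat) (t : Int × Int × Int) : Int :=
  match axis with
  | 0 => t.1
  | 1 => t.2.1
  | _ => t.2.2

-- B's fold_axis: accumulate ONE affine-floor map (C, S, t) over all layers of one axis
def gifFoldAxis : List (List (String × Int × Int × Int)) → Nat → Int × Int × Int → Int × Int × Int
  | [], _, acc => acc
  | layer :: rest, axis, acc =>
      let c := 2 * gifSel axis ((PySem.Dict.get? (PySem.Dict.mk layer) "padding").getD (0, 0, 0))
               - gifSel axis ((PySem.Dict.get? (PySem.Dict.mk layer) "dilation").getD (0, 0, 0)) *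
                   (gifSel axis ((PySem.Dict.get? (PySem.Dict.mk layer) "kernel_size").getD (0, 0, 0)) - 1) - 1
      gifFoldAxis rest axis
        (acc.1 + (acc.2.2 + c) * acc.2.1,
         acc.2.1 * gifSel axis ((PySem.Dict.get? (PySem.Dict.mk layer) "stride").getD (0, 0, 0)),
         1)

-- B's apply: run the accumulated map once
def gifApply (x : Int) (m : Int × Int × Int) : Int :=
  PySem.Int.floordiv (x + m.1) m.2.1 + m.2.2

def get_in_features_3d_alt (h_in : Int) (w_in : Int) (d_in : Int) (layers_dict : List (List (String × Int × Int × Int))) : Int :=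
  gifApply d_in (gifFoldAxis layers_dict 0 (0, 1, 0)) *
  gifApply h_in (gifFoldAxis layers_dict 1 (0, 1, 0)) *
  gifApply w_in (gifFoldAxis layers_dict 2 (0, 1, 0))

-- ===== PRECONDITION & SPEC =====
-- Pre_ excludes layers missing one of the four keys or with a zero stride component (there
-- the Python A raises KeyError / ZeroDivisionError) and also layers with a NEGATIVE stride
-- component: a conv stride is a count ≥ 1, and on that unnatural input B's single-division
-- composition (which needs positive divisors to nest floor divisions) need not match A.
def Pre_get_in_features_3d (h_in : Int) (w_in : Int) (d_in : Int) (layers_dict : List (List (String × Int × Int × Int))) : Prop :=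
  ∀ layer ∈ layers_dict,
    (PySem.Dict.get? (PySem.Dict.mk layer) "padding").isSome = true ∧
    (PySem.Dict.get? (PySem.Dict.mk layer) "dilation").isSome = true ∧
    (PySem.Dict.get? (PySem.Dict.mk layer) "kernel_size").isSome = true ∧
    (PySem.Dict.get? (PySem.Dict.mk layer) "stride").isSome = true ∧
    1 ≤ ((PySem.Dict.get? (PySem.Dict.mk layer) "stride").getD (1, 1, 1)).1 ∧
    1 ≤ ((PySem.Dict.get? (PySem.Dict.mk layer) "stride").getD (1, 1, 1)).2.1 ∧
    1 ≤ ((PySem.Dict.get? (PySem.Dict.mk layer) "stride").getD (1, 1, 1)).2.2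
instance (h_in : Int) (w_in : Int) (d_in : Int) (layers_dict : List (List (String × Int × Int × Int))) : Decidable (Pre_get_in_features_3d h_in w_in d_in layers_dict) := by unfold Pre_get_in_features_3d; infer_instance

def pvWitness_get_in_features_3d : Int × Int × Int × (List (List (String × Int × Int × Int))) :=
  (10, 11, 12,
   [[("padding", 1, 1, 0), ("dilation", 1, 1, 1), ("kernel_size", 3, 3, 3), ("stride", 2, 1, 1)]])

def Spec_get_in_features_3d (h_in : Int) (w_in : Int) (d_in : Int) (layers_dict : List (List (String × Int × Int × Int))) (out : Int) : Prop := out = get_in_features_3d_alt h_in w_in d_in layers_dict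
instance (h_in : Int) (w_in : Int) (d_in : Int) (layers_dict : List (List (String × Int × Int × Int))) (out : Int) : Decidable (Spec_get_in_features_3d h_in w_in d_in layers_dict out) := by unfold Spec_get_in_features_3d; infer_instance

-- ===== CLAIM (what is proved, stated in full; the proofs are below) =====
def Claim_equal_get_in_features_3d : Prop := ∀ (h_in : Int) (w_in : Int) (d_in : Int) (layers_dict : List (List (String × Int × Int × Int))), Dom_get_in_features_3d h_in w_in d_in layers_dict → Pre_get_in_features_3d h_in w_in d_in layers_dict → Spec_get_in_features_3d h_in w_in d_in layers_dict (get_in_features_3d h_in w_in d_in layers_dict)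

-- ===== LEMMAS AND PROOFS =====
-- floor divisions by positive divisors nest through an added constant
theorem gif_fdiv_compose (z m S s : Int) (hS : 0 < S) (hs : 0 < s) :
    PySem.Int.floordiv (PySem.Int.floordiv z S + m) s
      = PySem.Int.floordiv (z + m * S) (S * s) := by
  have h1 : PySem.Int.floordiv z S + m = PySem.Int.floordiv (z + m * S) S := by
    rw [PySem.Int.floordiv_eq_ediv_of_pos hS, PySem.Int.floordiv_eq_ediv_of_pos hS,
      Int.add_mul_ediv_right _ _ (by omega : S ≠ 0)]
  rw [h1, PySem.Int.floordiv_eq_ediv_of_pos hs, PySem.Int.floordiv_eq_ediv_of_pos hS,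
    PySem.Int.floordiv_eq_ediv_of_pos (by positivity : (0:Int) < S * s),
    Int.ediv_ediv_of_nonneg (by omega)]

-- stride of one axis, as Pre_ constrains it
def gifStride (axis : Nat) (layer : List (String × Int × Int × Int)) : Int :=
  gifSel axis ((PySem.Dict.get? (PySem.Dict.mk layer) "stride").getD (0, 0, 0))

-- per-axis iteration of the conv formula (proof helper characterising A per axis)
def gifIter : List (List (String × Int × Int × Int)) → Nat → Int → Int
  | [], _, x => x
  | layer :: rest, axis, x =>
      gifIter rest axis
        (PySem.Int.floordiv
          (x + 2 * gifSel axis ((PySem.Dict.get? (PySem.Dict.mk layer) "padding").getD (0, 0, 0))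
             - gifSel axis ((PySem.Dict.get? (PySem.Dict.mk layer) "dilation").getD (0, 0, 0)) *
                 (gifSel axis ((PySem.Dict.get? (PySem.Dict.mk layer) "kernel_size").getD (0, 0, 0)) - 1) - 1)
          (gifSel axis ((PySem.Dict.get? (PySem.Dict.mk layer) "stride").getD (0, 0, 0))) + 1)

-- A's fused loop computes, componentwise, the three per-axis iterations
theorem gifLoopA_eq_iter (ls : List (List (String × Int × Int × Int))) :
    ∀ d h w : Int, gifLoopA ls d h w = (gifIter ls 0 d, gifIter ls 1 h, gifIter ls 2 w) := by
  induction ls with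
  | nil => intro d h w; rfl
  | cons layer rest ih =>
      intro d h w
      simp only [gifLoopA, gifIter, gifStepA, gifSel]
      exact ih _ _ _

-- invariant: applying B's accumulated map equals iterating, for any accumulator with S > 0
theorem gifFoldAxis_apply (ls : List (List (String × Int × Int × Int))) (axis : Nat)
    (hstr : ∀ layer ∈ ls,
      1 ≤ gifSel axis ((PySem.Dict.get? (PySem.Dict.mk layer) "stride").getD (0, 0, 0))) :
    ∀ C S t x : Int, 0 < S →
      gifApply x (gifFoldAxis ls axis (C, S, t)) = gifIter ls axis (gifApply x (C, S, t)) := by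
  induction ls with
  | nil => intro C S t x _; rfl
  | cons layer rest ih =>
      intro C S t x hS
      have hs : 1 ≤ gifSel axis ((PySem.Dict.get? (PySem.Dict.mk layer) "stride").getD (0, 0, 0)) :=
        hstr layer (by simp)
      have hrest : ∀ l ∈ rest,
          1 ≤ gifSel axis ((PySem.Dict.get? (PySem.Dict.mk l) "stride").getD (0, 0, 0)) :=
        fun l hl => hstr l (by simp [hl])
      simp only [gifFoldAxis, gifIter]
      rw [ih hrest _ _ _ _ (by positivity)]
      congr 1
      simp only [gifApply]
      generalize gifSel axis ((PySem.Dict.get? (PySem.Dict.mk layer) "stride").getD (0, 0, 0)) = sv at hs ⊢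
      generalize gifSel axis ((PySem.Dict.get? (PySem.Dict.mk layer) "padding").getD (0, 0, 0)) = pd
      generalize gifSel axis ((PySem.Dict.get? (PySem.Dict.mk layer) "dilation").getD (0, 0, 0)) = dl
      generalize gifSel axis ((PySem.Dict.get? (PySem.Dict.mk layer) "kernel_size").getD (0, 0, 0)) = kn
      rw [show PySem.Int.floordiv (x + C) S + t + 2 * pd - dl * (kn - 1) - 1
            = PySem.Int.floordiv (x + C) S + (t + (2 * pd - dl * (kn - 1) - 1)) from by ring,
        gif_fdiv_compose (x + C) (t + (2 * pd - dl * (kn - 1) - 1)) S sv hS (by omega),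
        show x + (C + (t + (2 * pd - dl * (kn - 1) - 1)) * S)
            = x + C + (t + (2 * pd - dl * (kn - 1) - 1)) * S from by ring]

theorem gif_main (ls : List (List (String × Int × Int × Int)))
    (h : ∀ layer ∈ ls,
      (PySem.Dict.get? (PySem.Dict.mk layer) "padding").isSome = true ∧
      (PySem.Dict.get? (PySem.Dict.mk layer) "dilation").isSome = true ∧
      (PySem.Dict.get? (PySem.Dict.mk layer) "kernel_size").isSome = true ∧
      (PySem.Dict.get? (PySem.Dict.mk layer) "stride").isSome = true ∧
      1 ≤ ((PySem.Dict.get? (PySem.Dict.mk layer) "stride").getD (1, 1, 1)).1 ∧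
      1 ≤ ((PySem.Dict.get? (PySem.Dict.mk layer) "stride").getD (1, 1, 1)).2.1 ∧
      1 ≤ ((PySem.Dict.get? (PySem.Dict.mk layer) "stride").getD (1, 1, 1)).2.2) :
    ∀ d h' w : Int, gifLoopA ls d h' w
      = (gifApply d (gifFoldAxis ls 0 (0, 1, 0)),
         gifApply h' (gifFoldAxis ls 1 (0, 1, 0)),
         gifApply w (gifFoldAxis ls 2 (0, 1, 0))) := by
  intro d h' w
  have hstr : ∀ axis : Nat, ∀ layer ∈ ls,
      1 ≤ gifSel axis ((PySem.Dict.get? (PySem.Dict.mk layer) "stride").getD (0, 0, 0)) := by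
    intro axis layer hl
    obtain ⟨-, -, -, hsome, h1, h2, h3⟩ := h layer hl
    obtain ⟨v, hv⟩ := Option.isSome_iff_exists.mp hsome
    rw [hv] at h1 h2 h3 ⊢
    match axis with
    | 0 => exact h1
    | 1 => exact h2
    | Nat.succ (Nat.succ n) => exact h3
  have hx : ∀ x : Int, gifApply x ((0 : Int), (1 : Int), (0 : Int)) = x := by
    intro x
    simp only [gifApply]
    rw [PySem.Int.floordiv_eq_ediv_of_pos (by omega : (0:Int) < (1:Int))]
    omega
  rw [gifLoopA_eq_iter]
  rw [gifFoldAxis_apply ls 0 (hstr 0) _ _ _ _ (by omega),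
      gifFoldAxis_apply ls 1 (hstr 1) _ _ _ _ (by omega),
      gifFoldAxis_apply ls 2 (hstr 2) _ _ _ _ (by omega),
      hx, hx, hx]

-- ===== VERDICT (by name: the statement is the Claim_ definition above) =====
theorem get_in_features_3d_spec : Claim_equal_get_in_features_3d := by
  intro h_in w_in d_in layers_dict _ hpre
  unfold Spec_get_in_features_3d get_in_features_3d get_in_features_3d_alt
  rw [gif_main layers_dict hpre]
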